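-- pv_equiv track=rewrite | github.com/soundarzozm/codeforces | 1035/A.py | solve
-- ===== SOURCE A (Python) =====
-- def solve(a, b, x, y):
--     diff = b - a
--     cost = 0
--
--     if diff == 0:
--         return cost
--
--     if a % 2 != 0 and diff == -1:
--         return y
--
--     if diff < 0:
--         return -1
--
--     if x <= y:
--         return diff * x
--
--     while diff > 0:
--         if (a % 2 == 0):
--             cost += y
--         else:
--             cost += x
--
--         a += 1
--         diff -= 1
--
--     return cost
-- ===== SOURCE B (Python) =====
-- def solve(a, b, x, y):
--     diff = b - a
--     if diff == 0:
--         return 0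
--     if a % 2 != 0 and diff == -1:
--         return y
--     if diff < 0:
--         return -1
--     if x <= y:
--         return diff * x
--     # O(1): count even starting points in [a, b) and pay y for each, x for the odd ones
--     evens = (b + 1) // 2 - (a + 1) // 2
--     return evens * y + (diff - evens) * x
-- ===== Notes on version B (the rewrite author's own statement) =====
-- stated objective: faster
-- what changed: The per-step while loop over a..b-1 is replaced by an O(1) closed form counting even starting points in [a,b) via floor-division.
import Mathlib
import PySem

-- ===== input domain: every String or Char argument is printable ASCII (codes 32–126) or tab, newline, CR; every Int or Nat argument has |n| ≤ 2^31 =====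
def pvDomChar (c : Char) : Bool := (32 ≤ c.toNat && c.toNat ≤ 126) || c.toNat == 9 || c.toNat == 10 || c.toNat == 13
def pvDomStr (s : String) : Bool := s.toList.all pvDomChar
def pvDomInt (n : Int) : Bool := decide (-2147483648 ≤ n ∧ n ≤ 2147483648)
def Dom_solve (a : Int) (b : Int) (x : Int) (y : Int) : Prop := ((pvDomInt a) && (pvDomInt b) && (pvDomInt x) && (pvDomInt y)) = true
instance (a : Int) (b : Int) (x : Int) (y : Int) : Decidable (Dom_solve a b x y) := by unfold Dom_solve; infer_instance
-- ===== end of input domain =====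

-- B replaces A's per-step while loop with an O(1) closed form counting even starting points in [a,b).


-- ===== PORT A =====
-- the while loop of A, step for step: state (a, diff, cost)
def solveLoop (a : Int) (diff : Int) (cost : Int) (x : Int) (y : Int) : Int :=
  if diff > 0 then
    solveLoop (a + 1) (diff - 1) (cost + (if PySem.Int.mod a 2 == 0 then y else x)) x y
  else cost
termination_by diff.toNat
decreasing_by omega

def solve (a : Int) (b : Int) (x : Int) (y : Int) : Int :=
  let diff := b - a
  let cost : Int := 0
  if diff == 0 then cost
  else if PySem.Int.mod a 2 != 0 && diff == -1 then y
  else if diff < 0 then -1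
  else if x ≤ y then diff * x
  else solveLoop a diff cost x y

-- ===== PORT B =====
def solve_alt (a : Int) (b : Int) (x : Int) (y : Int) : Int :=
  let diff := b - a
  if diff == 0 then 0
  else if PySem.Int.mod a 2 != 0 && diff == -1 then y
  else if diff < 0 then -1
  else if x ≤ y then diff * x
  else
    let evens := PySem.Int.floordiv (b + 1) 2 - PySem.Int.floordiv (a + 1) 2
    evens * y + (diff - evens) * x

-- ===== PRECONDITION & SPEC =====
def Spec_solve (a : Int) (b : Int) (x : Int) (y : Int) (out : Int) : Prop := out = solve_alt a b x y
instance (a : Int) (b : Int) (x : Int) (y : Int) (out : Int) : Decidable (Spec_solve a b x y out) := by unfold Spec_solve; infer_instance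

-- ===== CLAIM (what is proved, stated in full; the proofs are below) =====
def Claim_equal_solve : Prop := ∀ (a : Int) (b : Int) (x : Int) (y : Int), Dom_solve a b x y → Spec_solve a b x y (solve a b x y)

-- ===== LEMMAS AND PROOFS =====

-- closed form of A's loop: E = number of even values among a, a+1, …, a+n-1
theorem solveLoop_closed (x y : Int) : ∀ (n : Nat) (a cost : Int),
    solveLoop a (n : Int) cost x y =
      cost + ((a + n + 1) / 2 - (a + 1) / 2) * y + ((n : Int) - ((a + n + 1) / 2 - (a + 1) / 2)) * x := by
  intro n
  induction n with
  | zero =>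
    intro a cost
    rw [solveLoop]
    simp
  | succ n ih =>
    intro a cost
    rw [solveLoop]
    have hpos : ((n + 1 : Nat) : Int) > 0 := by push_cast; omega
    rw [if_pos hpos]
    have hstep : ((n + 1 : Nat) : Int) - 1 = (n : Int) := by push_cast; omega
    rw [hstep, ih]
    have hmod : PySem.Int.mod a 2 = a % 2 := PySem.Int.mod_eq_emod_of_pos (by omega)
    rw [hmod]
    by_cases he : a % 2 = 0
    · have hE : ((a + 1) + n + 1) / 2 - ((a + 1) + 1) / 2
             = (a + ((n+1 : Nat) : Int) + 1) / 2 - (a + 1) / 2 - 1 := by push_cast; omega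
      have hc : ((a % 2 : Int) == 0) = true := by simp [he]
      rw [hc, if_pos rfl, hE]
      push_cast
      ring
    · have hE : ((a + 1) + n + 1) / 2 - ((a + 1) + 1) / 2
             = (a + ((n+1 : Nat) : Int) + 1) / 2 - (a + 1) / 2 := by push_cast; omega
      have hc : ((a % 2 : Int) == 0) = false := by simp [he]
      rw [hc]
      simp only [Bool.false_eq_true, if_false]
      rw [hE]
      push_cast
      ring

-- ===== VERDICT (by name: the statement is the Claim_ definition above) =====
theorem solve_spec : Claim_equal_solve := by
  intro a b x y _
  unfold Spec_solve solve solve_alt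
  dsimp only
  split_ifs with h0 h1 h2 h3
  · rfl
  · rfl
  · rfl
  · rfl
  · -- loop branch: b - a > 0
    have h0' : ¬ b - a = 0 := by simpa using h0
    have hn : ((b - a).toNat : Int) = b - a := by omega
    have hcl := solveLoop_closed x y (b - a).toNat a 0
    rw [hn] at hcl
    rw [hcl]
    have hfa : PySem.Int.floordiv (a + 1) 2 = (a + 1) / 2 :=
      PySem.Int.floordiv_eq_ediv_of_pos (by omega)
    have hfb : PySem.Int.floordiv (b + 1) 2 = (b + 1) / 2 :=
      PySem.Int.floordiv_eq_ediv_of_pos (by omega)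
    have hab : a + (b - a) + 1 = b + 1 := by ring
    rw [hab, hfa, hfb]
    ring
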